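-- pv_equiv track=rewrite | github.com/darakna/Playground | Pyton_stuff/HarveyMuddX/L4Hw3.py | allOnes
-- ===== SOURCE A (Python) =====
-- def allOnes(L):
--     if len(L)==0:
--         return True
--     else:
--         if L[0]==1:
--             return allOnes(L[1:])
--         else:
--             return False
-- ===== SOURCE B (Python) =====
-- def allOnes(L):
--     ok = True
--     for x in L:
--         if x != 1:
--             ok = False
--     return ok
-- ===== Notes on version B (the rewrite author's own statement) =====
-- stated objective: simpler
-- what changed: Replaced recursion over list slices with a single iterative forward pass maintaining a boolean flag.
import Mathlib
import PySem

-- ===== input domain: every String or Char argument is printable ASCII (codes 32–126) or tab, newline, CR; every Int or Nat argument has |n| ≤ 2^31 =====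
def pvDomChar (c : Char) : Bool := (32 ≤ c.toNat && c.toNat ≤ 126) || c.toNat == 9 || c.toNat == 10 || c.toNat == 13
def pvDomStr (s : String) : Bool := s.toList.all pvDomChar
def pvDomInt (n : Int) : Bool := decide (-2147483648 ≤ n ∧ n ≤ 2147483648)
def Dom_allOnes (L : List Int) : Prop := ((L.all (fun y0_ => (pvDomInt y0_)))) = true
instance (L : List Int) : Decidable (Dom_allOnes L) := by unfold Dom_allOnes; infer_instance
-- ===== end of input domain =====

-- B replaces A's recursion over list slices with one iterative forward pass keeping a boolean flag (simpler).

-- ===== PORT A =====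
-- recursion: empty → True; head == 1 → recurse on L[1:]; else False
def allOnes (L : List Int) : Bool :=
  if L.length = 0 then
    true
  else
    if PySem.List.pyGet? L 0 = some 1 then
      allOnes (PySem.List.slice L (some 1) none)
    else
      false
decreasing_by cases L with
  | nil => simp_all
  | cons a as => simp [PySem.List.slice_from_one]

-- ===== PORT B =====
-- flat for-loop over L updating a flag `ok`, returned after the loop
def allOnes_alt (L : List Int) : Bool :=
  L.foldl (fun ok x => if x ≠ 1 then false else ok) true

-- ===== PRECONDITION & SPEC =====
def Spec_allOnes (L : List Int) (out : Bool) : Prop := out = allOnes_alt L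
instance (L : List Int) (out : Bool) : Decidable (Spec_allOnes L out) := by unfold Spec_allOnes; infer_instance

-- ===== CLAIM (what is proved, stated in full; the proofs are below) =====
def Claim_equal_allOnes : Prop := ∀ (L : List Int), Dom_allOnes L → Spec_allOnes L (allOnes L)

-- ===== LEMMAS AND PROOFS =====
theorem allOnes_cons (x : Int) (xs : List Int) :
    allOnes (x :: xs) = if x = 1 then allOnes xs else false := by
  rw [allOnes.eq_def]
  simp [PySem.List.pyGet?, PySem.List.pyIdx?, PySem.List.slice_from_one]

theorem foldl_false (xs : List Int) :
    xs.foldl (fun ok x => if x ≠ 1 then false else ok) false = false := by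
  induction xs with
  | nil => rfl
  | cons y ys ih => simpa [List.foldl] using ih

theorem allOnes_eq (L : List Int) : allOnes L = allOnes_alt L := by
  induction L with
  | nil => rw [allOnes.eq_def]; rfl
  | cons x xs ih =>
    rw [allOnes_cons, allOnes_alt]
    by_cases h : x = 1
    · simp [h, ih, allOnes_alt]
    · simpa [List.foldl, h] using foldl_false xs

-- ===== VERDICT (by name: the statement is the Claim_ definition above) =====
theorem allOnes_spec : Claim_equal_allOnes := by
  intro L _
  exact allOnes_eq L
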